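-- pv_equiv track=rewrite | github.com/spboyer/record-cli-session | cli-session-recorder/resources/share_issue.py | extract_summary_for_issue
-- ===== SOURCE A (Python) =====
-- def extract_summary_for_issue(feedback_content: str) -> tuple[str, str]:
--     """
--     Extract title and body from feedback content for issue creation.
--
--     Returns:
--         Tuple of (title, body)
--     """
--     lines = feedback_content.split('\n')
--
--     # Extract task summary for title
--     title = "CLI Session Feedback"
--     in_task_section = False
--     task_lines = []
--
--     for line in lines:
--         if "### Task Attempted" in line:
--             in_task_section = True
--             continue
--         elif line.startswith("###") and in_task_section:
--             break
--         elif in_task_section and line.strip():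
--             task_lines.append(line.strip())
--
--     if task_lines:
--         # Use first 80 chars of task as title
--         task_text = " ".join(task_lines)
--         title = f"Feedback: {task_text[:80]}{'...' if len(task_text) > 80 else ''}"
--
--     # For body, include summary section only (not full JSON)
--     # Find where machine-readable section starts
--     body = feedback_content
--     json_marker = "## Full Session Data (Machine Readable)"
--     if json_marker in body:
--         body = body.split(json_marker)[0]
--         body += "\n\n*Full session data available in attached file or gist.*"
--
--     return title, body
-- ===== SOURCE B (Python) =====
-- def extract_summary_for_issue(feedback_content: str) -> tuple[str, str]:
--     """Extract title and body from feedback content for issue creation."""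
--     marker = "### Task Attempted"
--
--     # Title: locate the task section with raw-string substring searches.
--     _, found, tail = feedback_content.partition(marker)
--     section = tail.partition('\n')[2] if found else ''
--     if section.startswith('###'):
--         section = ''
--     else:
--         section = section.partition('\n###')[0]
--     task_lines = [l.strip() for l in section.split('\n') if l.strip()]
--
--     if task_lines:
--         task_text = " ".join(task_lines)
--         title = f"Feedback: {task_text[:80]}{'...' if len(task_text) > 80 else ''}"
--     else:
--         title = "CLI Session Feedback"
--
--     # Body: include the summary section only (not the full JSON).
--     body = feedback_content
--     json_marker = "## Full Session Data (Machine Readable)"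
--     if json_marker in body:
--         body = body.split(json_marker)[0]
--         body += "\n\n*Full session data available in attached file or gist.*"
--
--     return title, body
-- ===== Notes on version B (the rewrite author's own statement) =====
-- stated objective: alternative
-- what changed: Replaces A's per-line flag/state-machine scan with raw-string substring searches (str.partition at the task-section marker, drop to the next newline, cut at the first following heading, then strip and join); Pre_ excludes documents whose task-section marker occurs in more than one line, a malformed duplicated header on which A's scan (concatenating all marker sections) and B's first-section reading are equally defensible choices that no one would specify.
import Mathlib
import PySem

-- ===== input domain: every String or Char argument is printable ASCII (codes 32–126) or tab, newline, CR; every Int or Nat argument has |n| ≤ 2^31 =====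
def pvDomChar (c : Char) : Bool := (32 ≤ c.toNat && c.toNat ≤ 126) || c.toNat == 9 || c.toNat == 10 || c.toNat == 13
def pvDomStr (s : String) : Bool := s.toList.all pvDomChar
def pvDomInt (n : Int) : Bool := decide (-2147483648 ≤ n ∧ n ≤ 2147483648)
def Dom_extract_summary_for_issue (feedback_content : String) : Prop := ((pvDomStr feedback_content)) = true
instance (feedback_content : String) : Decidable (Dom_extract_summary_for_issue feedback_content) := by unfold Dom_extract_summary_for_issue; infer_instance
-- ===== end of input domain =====

-- B replaces A's per-line flag/state-machine scan with raw-string substring searches (str.partition);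
-- equal return values on Pre_ (task-section marker in at most one line); objective: alternative (same cost).


-- ===== PORT A =====
-- A's per-line state machine: in_task_section flag, 'continue' on the marker line, 'break' on '###'.
def pvLoopA : List String → Bool → List String → List String
  | [], _, acc => acc
  | l :: rest, ins, acc =>
    if PySem.Str.isIn "### Task Attempted" l then pvLoopA rest true acc
    else if PySem.Str.startswith l "###" && ins then acc
    else if ins && !(PySem.Str.strip l == "") then pvLoopA rest ins (acc ++ [PySem.Str.strip l])
    else pvLoopA rest ins acc

def extract_summary_for_issue (feedback_content : String) : String × String :=
  let lines := (PySem.Str.split? feedback_content "\n").getD []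
  let task_lines := pvLoopA lines false []
  let title :=
    if task_lines ≠ [] then
      let task_text := PySem.Str.join " " task_lines
      "Feedback: " ++ PySem.Str.slice task_text none (some 80) ++
        (if PySem.Str.len task_text > 80 then "..." else "")
    else "CLI Session Feedback"
  let body :=
    if PySem.Str.isIn "## Full Session Data (Machine Readable)" feedback_content then
      ((PySem.Str.split? feedback_content "## Full Session Data (Machine Readable)").getD []).headD ""
        ++ "\n\n*Full session data available in attached file or gist.*"
    else feedback_content
  (title, body)

-- ===== PORT B =====
-- str.partition(sep) for nonempty sep, via the first occurrence (PySem.Str.find); exact there.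
def pvPartition (s sep : String) : String × String × String :=
  let i := PySem.Str.find s sep
  if i = -1 then (s, "", "")
  else (PySem.Str.slice s none (some i), sep, PySem.Str.slice s (some (i + PySem.Str.len sep)) none)

-- Source B: section = tail.partition('\n')[2] if found else ''
def pvSectionB (feedback_content : String) : String :=
  let p1 := pvPartition feedback_content "### Task Attempted"
  if p1.2.1 ≠ "" then (pvPartition p1.2.2 "\n").2.2 else ""

-- Source B: '' if section.startswith('###') else section.partition('\n###')[0]
def pvCutB (s : String) : String :=
  if PySem.Str.startswith s "###" then "" else (pvPartition s "\n###").1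

def extract_summary_for_issue_alt (feedback_content : String) : String × String :=
  let sec := pvCutB (pvSectionB feedback_content)
  let task_lines :=
    (((PySem.Str.split? sec "\n").getD []).filter
      (fun l => !(PySem.Str.strip l == ""))).map PySem.Str.strip
  let title :=
    if task_lines ≠ [] then
      let task_text := PySem.Str.join " " task_lines
      "Feedback: " ++ PySem.Str.slice task_text none (some 80) ++
        (if PySem.Str.len task_text > 80 then "..." else "")
    else "CLI Session Feedback"
  let body :=
    if PySem.Str.isIn "## Full Session Data (Machine Readable)" feedback_content then
      ((PySem.Str.split? feedback_content "## Full Session Data (Machine Readable)").getD []).headD ""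
        ++ "\n\n*Full session data available in attached file or gist.*"
    else feedback_content
  (title, body)

-- ===== PRECONDITION & SPEC =====
-- Pre_ excludes documents whose task-section marker occurs in more than one line: a malformed,
-- duplicated header, on which A's scan (which concatenates all marker sections) and B's
-- first-section reading are equally defensible choices that no one would specify.
def Pre_extract_summary_for_issue (feedback_content : String) : Prop :=
  ((PySem.Str.split? feedback_content "\n").getD []).countP
    (fun l => PySem.Str.isIn "### Task Attempted" l) ≤ 1
instance (feedback_content : String) : Decidable (Pre_extract_summary_for_issue feedback_content) := by
  unfold Pre_extract_summary_for_issue; infer_instance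

def pvWitness_extract_summary_for_issue : String :=
  "## Feedback\n\n### Task Attempted\nfix the crash on startup\n\n### Environment\nlinux"

def Spec_extract_summary_for_issue (feedback_content : String) (out : String × String) : Prop := out = extract_summary_for_issue_alt feedback_content
instance (feedback_content : String) (out : String × String) : Decidable (Spec_extract_summary_for_issue feedback_content out) := by unfold Spec_extract_summary_for_issue; infer_instance

-- ===== CLAIM (what is proved, stated in full; the proofs are below) =====
def Claim_equal_extract_summary_for_issue : Prop := ∀ (feedback_content : String), Dom_extract_summary_for_issue feedback_content → Pre_extract_summary_for_issue feedback_content → Spec_extract_summary_for_issue feedback_content (extract_summary_for_issue feedback_content)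

-- ===== LEMMAS AND PROOFS =====

theorem pvFind_ne_neg_one_of_occ {t m : List Char} (j : Nat) (h : m <+: t.drop j) :
    PySem.Chars.find t m ≠ -1 := by
  have hin : PySem.Chars.isIn m t = true := (PySem.Chars.exists_prefix_drop_iff_isIn m t).mp ⟨j, h⟩
  intro hc
  rw [PySem.Chars.find_eq_neg_one_iff] at hc
  exact hc ((PySem.Chars.isIn_iff_infix m t).mp hin)

theorem pvFind_eq {s m : List Char} (p : Nat) (hocc : m <+: s.drop p)
    (hmin : ∀ i < p, ¬ m <+: s.drop i) : PySem.Chars.find s m = (p : Int) := by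
  have hne := pvFind_ne_neg_one_of_occ p hocc
  have h0 : 0 ≤ PySem.Chars.find s m := by
    have := PySem.Chars.neg_one_le_find s m; omega
  obtain ⟨h1, h2⟩ := PySem.Chars.find_spec h0
  have : (PySem.Chars.find s m).toNat = p := by
    rcases lt_trichotomy (PySem.Chars.find s m).toNat p with h | h | h
    · exact absurd h1 (hmin _ h)
    · exact h
    · exact absurd hocc (h2 _ h)
  omega

theorem pvFind_none {s m : List Char} (h : ∀ i, ¬ m <+: s.drop i) :
    PySem.Chars.find s m = -1 := by
  rw [PySem.Chars.find_eq_neg_one_iff]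
  intro hinf
  obtain ⟨j, hj⟩ := (PySem.Chars.exists_prefix_drop_iff_isIn m s).mpr ((PySem.Chars.isIn_iff_infix m s).mpr hinf)
  exact h j hj

theorem pvPrefix_append_of_le {α : Type} {m l t : List α} (h : m <+: l ++ t)
    (hlen : m.length ≤ l.length) : m <+: l := by
  have heq : m = (l ++ t).take m.length := by
    rw [List.prefix_iff_eq_take] at h; exact h
  rw [List.take_append, Nat.sub_eq_zero_of_le hlen, List.take_zero, List.append_nil] at heq
  rw [heq]; exact List.take_prefix _ _

theorem pvPrefix_nl {p l t : List Char} (hp : '\n' ∉ p) :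
    (p <+: l ++ '\n' :: t) ↔ p <+: l := by
  constructor
  · intro h
    by_cases hlen : p.length ≤ l.length
    · exact pvPrefix_append_of_le h hlen
    · exfalso
      push_neg at hlen
      have hlt : l.length < p.length := hlen
      have hlen2 : l.length < (l ++ '\n' :: t).length := by simp
      have hidx := h.getElem (i := l.length) hlt
      have h2 : (l ++ '\n' :: t)[l.length]'hlen2 = '\n' := by
        rw [List.getElem_append_right (le_refl _)]; simp
      have h3 : p[l.length]'hlt = '\n' := by rw [hidx]; exact h2
      exact hp (h3 ▸ List.getElem_mem hlt)
  · intro h; exact h.trans (List.prefix_append l ('\n' :: t))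

def pvH3 : List Char := "###".toList
def pvH4 : List Char := "\n###".toList

theorem pvDrop_shift0 {α : Type} (l u : List α) (j : Nat) :
    (l ++ u).drop (l.length + j) = u.drop j := by
  rw [List.drop_append, List.drop_eq_nil_of_le (by omega),
    show l.length + j - l.length = j by omega, List.nil_append]

theorem pvDrop_shift {α : Type} (l t : List α) (c : α) (i : Nat) :
    (l ++ c :: t).drop (l.length + 1 + i) = t.drop i := by
  rw [show l.length + 1 + i = l.length + (1 + i) by omega, pvDrop_shift0,
    show 1 + i = i + 1 by omega, List.drop_succ_cons]

theorem pvFind_append_left {m l t : List Char} (h : PySem.Chars.isIn m l = true) :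
    PySem.Chars.find (l ++ t) m = PySem.Chars.find l m := by
  have h0 : 0 ≤ PySem.Chars.find l m := by
    have h1 := PySem.Chars.neg_one_le_find l m
    have h2 : PySem.Chars.find l m ≠ -1 := by
      intro hc; rw [PySem.Chars.find_eq_neg_one_iff] at hc
      exact hc ((PySem.Chars.isIn_iff_infix m l).mp h)
    omega
  obtain ⟨hocc, hmin⟩ := PySem.Chars.find_spec h0
  set p := (PySem.Chars.find l m).toNat with hp
  have hplen : p + m.length ≤ l.length := by
    have hll := hocc.length_le
    rw [List.length_drop] at hll
    have hfl := PySem.Chars.find_le_length l m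
    omega
  have heq : PySem.Chars.find (l ++ t) m = (p : Int) := by
    apply pvFind_eq
    · rw [List.drop_append, Nat.sub_eq_zero_of_le (by omega), List.drop_zero]
      exact hocc.trans (List.prefix_append _ _)
    · intro i hi hpre
      rw [List.drop_append, Nat.sub_eq_zero_of_le (by omega), List.drop_zero] at hpre
      exact hmin i hi (pvPrefix_append_of_le hpre (by simp [List.length_drop]; omega))
  omega

theorem pvFind_append_sep {m l t : List Char} (hm : PySem.Chars.isIn m l = false)
    (hnl : '\n' ∉ m) :
    PySem.Chars.find (l ++ '\n' :: t) m =
      if PySem.Chars.find t m = -1 then -1 else (l.length : Int) + 1 + PySem.Chars.find t m := by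
  have nooccl : ∀ i, ¬ m <+: l.drop i := by
    intro i hi
    have : PySem.Chars.isIn m l = true := (PySem.Chars.exists_prefix_drop_iff_isIn m l).mp ⟨i, hi⟩
    rw [hm] at this; exact Bool.false_ne_true this
  have noled : ∀ i, i ≤ l.length → ¬ m <+: (l ++ '\n' :: t).drop i := by
    intro i hi hpre
    rw [List.drop_append, Nat.sub_eq_zero_of_le hi, List.drop_zero] at hpre
    exact nooccl i ((pvPrefix_nl hnl).mp hpre)
  by_cases hft : PySem.Chars.find t m = -1
  · rw [if_pos hft]
    apply pvFind_none
    intro i hpre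
    by_cases hi : i ≤ l.length
    · exact noled i hi hpre
    · have hj : i = l.length + 1 + (i - l.length - 1) := by omega
      rw [hj, pvDrop_shift] at hpre
      exact pvFind_ne_neg_one_of_occ _ hpre hft
  · rw [if_neg hft]
    have h0 : 0 ≤ PySem.Chars.find t m := by
      have := PySem.Chars.neg_one_le_find t m; omega
    obtain ⟨hocc, hmin⟩ := PySem.Chars.find_spec h0
    have heq : PySem.Chars.find (l ++ '\n' :: t) m
        = ((l.length + 1 + (PySem.Chars.find t m).toNat : Nat) : Int) := by
      apply pvFind_eq
      · rw [pvDrop_shift]; exact hocc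
      · intro i hi hpre
        by_cases hile : i ≤ l.length
        · exact noled i hile hpre
        · have hj : i = l.length + 1 + (i - l.length - 1) := by omega
          rw [hj, pvDrop_shift] at hpre
          exact hmin _ (by omega) hpre
    rw [heq]; push_cast; omega

theorem pvFind_append_nlhead {m l t : List Char} (m' : List Char) (hhead : m = '\n' :: m')
    (hl : '\n' ∉ l) :
    PySem.Chars.find (l ++ '\n' :: t) m =
      if PySem.Chars.find ('\n' :: t) m = -1 then -1
      else (l.length : Int) + PySem.Chars.find ('\n' :: t) m := by
  have nolt : ∀ i, i < l.length → ¬ m <+: (l ++ '\n' :: t).drop i := by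
    intro i hi hpre
    rw [List.drop_append, Nat.sub_eq_zero_of_le (by omega), List.drop_zero] at hpre
    have hld : l.drop i ≠ [] := by simp [List.drop_eq_nil_iff]; omega
    obtain ⟨a, x', hax⟩ := List.exists_cons_of_ne_nil hld
    rw [hax, hhead, List.cons_append, List.cons_prefix_cons] at hpre
    have ha : a ∈ l := by
      have : a ∈ l.drop i := by rw [hax]; exact List.mem_cons_self
      exact List.mem_of_mem_drop this
    rw [← hpre.1] at ha
    exact hl ha
  by_cases hu : PySem.Chars.find ('\n' :: t) m = -1
  · rw [if_pos hu]
    apply pvFind_none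
    intro i hpre
    by_cases hi : i < l.length
    · exact nolt i hi hpre
    · have hj : i = l.length + (i - l.length) := by omega
      rw [hj, pvDrop_shift0] at hpre
      exact pvFind_ne_neg_one_of_occ _ hpre hu
  · rw [if_neg hu]
    have h0 : 0 ≤ PySem.Chars.find ('\n' :: t) m := by
      have := PySem.Chars.neg_one_le_find ('\n' :: t) m; omega
    obtain ⟨hocc, hmin⟩ := PySem.Chars.find_spec h0
    have heq : PySem.Chars.find (l ++ '\n' :: t) m
        = ((l.length + (PySem.Chars.find ('\n' :: t) m).toNat : Nat) : Int) := by
      apply pvFind_eq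
      · rw [pvDrop_shift0]; exact hocc
      · intro i hi hpre
        by_cases hilt : i < l.length
        · exact nolt i hilt hpre
        · have hj : i = l.length + (i - l.length) := by omega
          rw [hj, pvDrop_shift0] at hpre
          exact hmin _ (by omega) hpre
    rw [heq]; push_cast; omega

theorem pvFind_cons_nl (t : List Char) :
    PySem.Chars.find ('\n' :: t) pvH4 =
      if PySem.Chars.startswith t pvH3 then 0
      else if PySem.Chars.find t pvH4 = -1 then -1 else 1 + PySem.Chars.find t pvH4 := by
  have hH : pvH4 = '\n' :: pvH3 := by decide
  by_cases hs : PySem.Chars.startswith t pvH3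
  · rw [if_pos hs]
    have : PySem.Chars.find ('\n' :: t) pvH4 = ((0 : Nat) : Int) := by
      apply pvFind_eq
      · rw [List.drop_zero, hH, List.cons_prefix_cons]
        exact ⟨rfl, (PySem.Chars.startswith_iff t pvH3).mp hs⟩
      · intro i hi; omega
    simpa using this
  · rw [if_neg hs]
    have h0 : ¬ pvH4 <+: ('\n' :: t).drop 0 := by
      rw [List.drop_zero, hH, List.cons_prefix_cons]
      rintro ⟨-, hpre⟩
      exact hs ((PySem.Chars.startswith_iff t pvH3).mpr hpre)
    by_cases hft : PySem.Chars.find t pvH4 = -1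
    · rw [if_pos hft]
      apply pvFind_none
      intro i hpre
      cases i with
      | zero => exact h0 hpre
      | succ j =>
        rw [List.drop_succ_cons] at hpre
        exact pvFind_ne_neg_one_of_occ _ hpre hft
    · rw [if_neg hft]
      have h0' : 0 ≤ PySem.Chars.find t pvH4 := by
        have := PySem.Chars.neg_one_le_find t pvH4; omega
      obtain ⟨hocc, hmin⟩ := PySem.Chars.find_spec h0'
      have heq : PySem.Chars.find ('\n' :: t) pvH4
          = (((PySem.Chars.find t pvH4).toNat + 1 : Nat) : Int) := by
        apply pvFind_eq
        · rw [List.drop_succ_cons]; exact hocc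
        · intro i hi hpre
          cases i with
          | zero => exact h0 hpre
          | succ j =>
            rw [List.drop_succ_cons] at hpre
            exact hmin _ (by omega) hpre
      rw [heq]; push_cast; omega

def pvM : List Char := "### Task Attempted".toList
def pvJoin (ls : List (List Char)) : List Char := ['\n'].intercalate ls

def pvSecC (cs : List Char) : List Char :=
  let f := PySem.Chars.find cs pvM
  if f = -1 then [] else
    let tl := cs.drop (f + 18).toNat
    let g := PySem.Chars.find tl ['\n']
    if g = -1 then [] else tl.drop (g + 1).toNat

def pvCutC (cs : List Char) : List Char :=
  if PySem.Chars.startswith cs pvH3 then [] else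
    let h := PySem.Chars.find cs pvH4
    if h = -1 then cs else cs.take h.toNat

theorem pvJoin_nil : pvJoin [] = [] := rfl

theorem pvJoin_singleton (l : List Char) : pvJoin [l] = l := by
  simp [pvJoin, List.intercalate]

theorem pvJoin_cons (l r : List Char) (rest : List (List Char)) :
    pvJoin (l :: r :: rest) = l ++ '\n' :: pvJoin (r :: rest) := by
  simp [pvJoin, List.intercalate]

theorem pvFind_singleton_none {u : List Char} {c : Char} (h : c ∉ u) :
    PySem.Chars.find u [c] = -1 := by
  apply pvFind_none
  intro i hpre
  exact h (List.mem_of_mem_drop (hpre.subset (List.mem_cons_self)))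

theorem pvFind_cons_self (t : List Char) (c : Char) :
    PySem.Chars.find (c :: t) [c] = 0 := by
  have : PySem.Chars.find (c :: t) [c] = ((0:Nat) : Int) := by
    apply pvFind_eq
    · rw [List.drop_zero, List.cons_prefix_cons]; exact ⟨rfl, List.nil_prefix⟩
    · intro i hi; omega
  simpa using this

theorem pvSecC_join (ls : List (List Char)) (h : ∀ l ∈ ls, '\n' ∉ l) :
    pvSecC (pvJoin ls) =
      match ls.findIdx? (fun l => PySem.Chars.isIn pvM l) with
      | none => []
      | some i => pvJoin (ls.drop (i+1)) := by
  induction ls with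
  | nil =>
    simp only [pvJoin_nil, List.findIdx?_nil]
    simp [pvSecC, show PySem.Chars.find [] pvM = -1 by decide]
  | cons l rest ih =>
    have hl : '\n' ∉ l := h l List.mem_cons_self
    have hrest : ∀ x ∈ rest, '\n' ∉ x := fun x hx => h x (List.mem_cons_of_mem l hx)
    by_cases hm : PySem.Chars.isIn pvM l = true
    · -- marker in l : section = join of the rest
      have h0 : 0 ≤ PySem.Chars.find l pvM := by
        have h1 := PySem.Chars.neg_one_le_find l pvM
        have h2 : PySem.Chars.find l pvM ≠ -1 := by
          intro hc; rw [PySem.Chars.find_eq_neg_one_iff] at hc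
          exact hc ((PySem.Chars.isIn_iff_infix pvM l).mp hm)
        omega
      obtain ⟨hocc, -⟩ := PySem.Chars.find_spec h0
      have hlen18 : (PySem.Chars.find l pvM).toNat + 18 ≤ l.length := by
        have hll := hocc.length_le
        rw [List.length_drop] at hll
        have hfl := PySem.Chars.find_le_length l pvM
        have : pvM.length = 18 := by decide
        omega
      simp only [List.findIdx?_cons, hm, if_pos]
      rcases rest with _ | ⟨r, rr⟩
      · -- last line: no newline after the marker line
        rw [pvJoin_singleton]
        simp only [pvSecC]
        rw [if_neg (by omega)]
        have htl : PySem.Chars.find (l.drop (PySem.Chars.find l pvM + 18).toNat) ['\n'] = -1 :=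
          pvFind_singleton_none (fun hc => hl (List.mem_of_mem_drop hc))
        simp [htl, pvJoin_nil]
      · rw [pvJoin_cons]
        simp only [pvSecC]
        rw [pvFind_append_left hm, if_neg (by omega)]
        have hsplit : (PySem.Chars.find l pvM + 18).toNat = (PySem.Chars.find l pvM).toNat + 18 := by omega
        rw [hsplit, List.drop_append, Nat.sub_eq_zero_of_le hlen18, List.drop_zero]
        have hsfx : '\n' ∉ l.drop ((PySem.Chars.find l pvM).toNat + 18) :=
          fun hc => hl (List.mem_of_mem_drop hc)
        rw [pvFind_append_nlhead [] rfl hsfx, pvFind_cons_self]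
        rw [if_neg (by omega)]
        rw [if_neg (by omega)]
        have harith : (((l.drop ((PySem.Chars.find l pvM).toNat + 18)).length : Int) + 0 + 1).toNat
            = (l.drop ((PySem.Chars.find l pvM).toNat + 18)).length + 1 + 0 := by omega
        rw [harith, pvDrop_shift, List.drop_zero]
        simp
    · -- no marker in l
      have hmf : PySem.Chars.isIn pvM l = false := by
        cases hq : PySem.Chars.isIn pvM l
        · rfl
        · exact absurd hq hm
      simp only [List.findIdx?_cons, hmf]
      rcases rest with _ | ⟨r, rr⟩
      · rw [pvJoin_singleton]
        have hf : PySem.Chars.find l pvM = -1 := by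
          rw [PySem.Chars.find_eq_neg_one_iff]
          exact (PySem.Chars.isIn_eq_false_iff pvM l).mp hmf
        simp [pvSecC, hf]
      · rw [pvJoin_cons]
        have ihv := ih hrest
        by_cases hft : PySem.Chars.find (pvJoin (r :: rr)) pvM = -1
        · have hsec : pvSecC (pvJoin (r :: rr)) = [] := by simp [pvSecC, hft]
          have hlhs : pvSecC (l ++ '\n' :: pvJoin (r :: rr)) = [] := by
            simp only [pvSecC]
            rw [pvFind_append_sep hmf (by decide), if_pos hft]
            simp
          rw [hlhs]
          rw [hsec] at ihv
          cases hidx : List.findIdx? (fun l => PySem.Chars.isIn pvM l) (r :: rr) with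
          | none => simp
          | some i =>
            rw [hidx] at ihv
            simpa using ihv.symm
        · have hf0 : 0 ≤ PySem.Chars.find (pvJoin (r :: rr)) pvM := by
            have := PySem.Chars.neg_one_le_find (pvJoin (r :: rr)) pvM; omega
          have hlhs : pvSecC (l ++ '\n' :: pvJoin (r :: rr)) = pvSecC (pvJoin (r :: rr)) := by
            simp only [pvSecC]
            rw [pvFind_append_sep hmf (by decide), if_neg hft]
            rw [if_neg (by omega), if_neg hft]
            have harith : ((l.length : Int) + 1 + PySem.Chars.find (pvJoin (r :: rr)) pvM + 18).toNat
                = l.length + 1 + (PySem.Chars.find (pvJoin (r :: rr)) pvM + 18).toNat := by omega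
            rw [harith, pvDrop_shift]
          rw [hlhs, ihv]
          cases hidx : List.findIdx? (fun l => PySem.Chars.isIn pvM l) (r :: rr) with
          | none => simp
          | some i => simp

theorem pvStartswith_append_nl (l t : List Char) :
    PySem.Chars.startswith (l ++ '\n' :: t) pvH3 = PySem.Chars.startswith l pvH3 := by
  by_cases hb : PySem.Chars.startswith l pvH3 = true
  · rw [hb]
    exact (PySem.Chars.startswith_iff _ _).mpr
      ((pvPrefix_nl (by decide)).mpr ((PySem.Chars.startswith_iff _ _).mp hb))
  · cases hq : PySem.Chars.startswith (l ++ '\n' :: t) pvH3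
    · cases hq2 : PySem.Chars.startswith l pvH3
      · rfl
      · exact absurd hq2 hb
    · exact absurd ((PySem.Chars.startswith_iff _ _).mpr
        ((pvPrefix_nl (by decide)).mp ((PySem.Chars.startswith_iff _ _).mp hq))) hb

theorem pvStartswith_join_cons (r : List Char) (rr : List (List Char)) :
    PySem.Chars.startswith (pvJoin (r :: rr)) pvH3 = PySem.Chars.startswith r pvH3 := by
  rcases rr with _ | ⟨r2, rr2⟩
  · rw [pvJoin_singleton]
  · rw [pvJoin_cons, pvStartswith_append_nl]

theorem pvFind_H4_none {u : List Char} (h : '\n' ∉ u) : PySem.Chars.find u pvH4 = -1 := by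
  apply pvFind_none
  intro i hpre
  exact h (List.mem_of_mem_drop (hpre.subset (by decide)))

theorem pvCutC_join (sls : List (List Char)) (h : ∀ l ∈ sls, '\n' ∉ l) :
    pvCutC (pvJoin sls) =
      pvJoin (sls.take ((sls.findIdx? (fun l => PySem.Chars.startswith l pvH3)).getD sls.length)) := by
  induction sls with
  | nil =>
    simp [pvCutC, pvJoin_nil, show PySem.Chars.startswith [] pvH3 = false by decide,
      show PySem.Chars.find [] pvH4 = -1 by decide]
  | cons l rest ih =>
    have hl : '\n' ∉ l := h l List.mem_cons_self
    have hrest : ∀ x ∈ rest, '\n' ∉ x := fun x hx => h x (List.mem_cons_of_mem l hx)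
    by_cases hs : PySem.Chars.startswith l pvH3 = true
    · simp only [List.findIdx?_cons, hs, if_pos, Option.getD_some, List.take_zero, pvJoin_nil]
      rcases rest with _ | ⟨r, rr⟩
      · rw [pvJoin_singleton]; simp [pvCutC, hs]
      · rw [pvJoin_cons]; simp [pvCutC, pvStartswith_append_nl, hs]
    · have hsf : PySem.Chars.startswith l pvH3 = false := by
        cases hq : PySem.Chars.startswith l pvH3
        · rfl
        · exact absurd hq hs
      simp only [List.findIdx?_cons, hsf, Bool.false_eq_true, if_false]
      rcases rest with _ | ⟨r, rr⟩
      · rw [pvJoin_singleton]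
        have hf : PySem.Chars.find l pvH4 = -1 := pvFind_H4_none hl
        simp [pvCutC, hsf, hf, pvJoin_singleton]
      · rw [pvJoin_cons]
        set t := pvJoin (r :: rr) with ht
        set k := ((r :: rr).findIdx? (fun l => PySem.Chars.startswith l pvH3)).getD (r :: rr).length with hk
        have hkgd : (Option.map (fun i => i + 1)
            ((r :: rr).findIdx? (fun l => PySem.Chars.startswith l pvH3))).getD (l :: r :: rr).length
            = 1 + k := by
          rw [hk]
          cases (r :: rr).findIdx? (fun l => PySem.Chars.startswith l pvH3) with
          | none => simp [List.length_cons]; omega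
          | some j => simp; omega
        rw [hkgd]
        have htake : (l :: r :: rr).take (1 + k) = l :: (r :: rr).take k := by
          rw [show 1 + k = k + 1 by omega]; rfl
        rw [htake]
        simp only [pvCutC, pvStartswith_append_nl, hsf, Bool.false_eq_true, if_false]
        rw [pvFind_append_nlhead pvH3 (by decide) hl, pvFind_cons_nl]
        by_cases hsr : PySem.Chars.startswith r pvH3 = true
        · -- the first following line is a stop line
          have hsrt : PySem.Chars.startswith t pvH3 = true := by
            rw [ht, pvStartswith_join_cons]; exact hsr
          rw [if_pos hsrt, if_neg (by decide : ¬(0:Int) = -1)]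
          rw [if_neg (by omega : ¬(l.length : Int) + 0 = -1)]
          have hk0 : k = 0 := by simp [hk, List.findIdx?_cons, hsr]
          rw [hk0]
          simp only [List.take_zero, pvJoin_singleton]
          have harith : ((l.length : Int) + 0).toNat = l.length := by omega
          rw [harith, List.take_left]
        · have hsrf : PySem.Chars.startswith r pvH3 = false := by
            cases hq : PySem.Chars.startswith r pvH3
            · rfl
            · exact absurd hq hsr
          have hsrt : PySem.Chars.startswith t pvH3 = false := by
            rw [ht, pvStartswith_join_cons]; exact hsrf
          rw [hsrt]
          simp only [Bool.false_eq_true, if_false]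
          have hk1 : 1 ≤ k := by
            rw [hk, List.findIdx?_cons, hsrf]
            simp only [Bool.false_eq_true, if_false]
            cases List.findIdx? (fun l => PySem.Chars.startswith l pvH3) rr with
            | none => simp [List.length_cons]
            | some v => simp
          have htkcons : (r :: rr).take k = r :: rr.take (k - 1) := by
            obtain ⟨k', hk'⟩ : ∃ k', k = k' + 1 := ⟨k - 1, by omega⟩
            rw [hk']; simp
          have ihv := ih hrest
          by_cases hft : PySem.Chars.find t pvH4 = -1
          · rw [if_pos hft, if_pos rfl, if_pos rfl]
            have hct : pvCutC t = t := by simp [pvCutC, hsrt, hft]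
            rw [hct] at ihv
            rw [htkcons, pvJoin_cons, ← htkcons, ← ihv]
          · have hq0 : 0 ≤ PySem.Chars.find t pvH4 := by
              have := PySem.Chars.neg_one_le_find t pvH4; omega
            rw [if_neg hft, if_neg (by omega : ¬(1:Int) + PySem.Chars.find t pvH4 = -1),
              if_neg (by omega : ¬(l.length : Int) + (1 + PySem.Chars.find t pvH4) = -1)]
            have hct : pvCutC t = t.take (PySem.Chars.find t pvH4).toNat := by
              simp [pvCutC, hsrt, hft]
            rw [hct] at ihv
            have harith : ((l.length : Int) + (1 + PySem.Chars.find t pvH4)).toNat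
                = l.length + ((PySem.Chars.find t pvH4).toNat + 1) := by omega
            rw [harith]
            rw [List.take_append, List.take_of_length_le (by omega),
              show l.length + ((PySem.Chars.find t pvH4).toNat + 1) - l.length
                = (PySem.Chars.find t pvH4).toNat + 1 by omega,
              List.take_succ_cons]
            rw [htkcons, pvJoin_cons, ← htkcons, ← ihv]

theorem pvGo_spec (c : Char) : ∀ (fuel : Nat) (l cur : List Char) (acc2 : List (List Char)),
    l.length < fuel →
    PySem.Chars.splitOn.go [c] fuel l cur acc2 =
      acc2.reverse ++ (l.splitOn c).modifyHead (fun y => cur.reverse ++ y) := by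
  intro fuel
  induction fuel with
  | zero => intro l cur acc2 h; omega
  | succ fuel ih =>
    intro l cur acc2 h
    cases l with
    | nil =>
      simp [PySem.Chars.splitOn.go, List.splitOn, List.splitOnP_nil]
    | cons x rest =>
      have hstep : PySem.Chars.splitOn.go [c] (fuel+1) (x :: rest) cur acc2 =
          if [c].isPrefixOf (x :: rest) then
            PySem.Chars.splitOn.go [c] fuel ((x :: rest).drop 1) [] (cur.reverse :: acc2)
          else PySem.Chars.splitOn.go [c] fuel rest (x :: cur) acc2 := by
        rfl
      rw [hstep]
      have hpre : [c].isPrefixOf (x :: rest) = (x == c) := by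
        by_cases hxc : x = c
        · subst hxc; simp [List.isPrefixOf]
        · have h1 : (c == x) = false := beq_eq_false_iff_ne.mpr (Ne.symm hxc)
          have h2 : (x == c) = false := beq_eq_false_iff_ne.mpr hxc
          simp [List.isPrefixOf, h1, h2]
      rw [hpre]
      by_cases hbc : (x == c) = true
      · rw [if_pos hbc, List.drop_one, List.tail_cons]
        rw [ih rest [] (cur.reverse :: acc2) (by simpa using h)]
        have hsp : (x :: rest).splitOn c = [] :: rest.splitOn c := by
          simp [List.splitOn, List.splitOnP_cons, hbc]
        rw [hsp]
        cases hL : rest.splitOn c with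
        | nil => simp
        | cons hd tl => simp
      · rw [if_neg hbc]
        rw [ih rest (x :: cur) acc2 (by simpa using h)]
        have hsp : (x :: rest).splitOn c = (rest.splitOn c).modifyHead (List.cons x) := by
          simp only [List.splitOn, List.splitOnP_cons]
          rw [if_neg hbc]
        rw [hsp]
        have hne : rest.splitOn c ≠ [] := List.splitOnP_ne_nil _ _
        obtain ⟨hd, tl, hL⟩ := List.exists_cons_of_ne_nil hne
        rw [hL]
        simp

theorem pvSplitOn_eq (cs : List Char) (c : Char) :
    PySem.Chars.splitOn cs [c] = cs.splitOn c := by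
  show PySem.Chars.splitOn.go [c] (cs.length + 1) cs [] [] = _
  rw [pvGo_spec c (cs.length + 1) cs [] [] (by omega)]
  cases hL : cs.splitOn c with
  | nil => simp
  | cons hd tl => simp

theorem pvSplitOn_not_mem (c : Char) (cs : List Char) : ∀ l ∈ cs.splitOn c, c ∉ l := by
  induction cs with
  | nil =>
    intro l hl
    rw [show ([] : List Char).splitOn c = [[]] by simp [List.splitOn, List.splitOnP_nil]] at hl
    rw [List.mem_singleton.mp hl]
    simp
  | cons x xs ih =>
    intro l hl
    by_cases hbc : (x == c) = true
    · rw [show (x :: xs).splitOn c = [] :: xs.splitOn c by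
        simp [List.splitOn, List.splitOnP_cons, hbc]] at hl
      rcases List.mem_cons.mp hl with rfl | hl
      · simp
      · exact ih l hl
    · obtain ⟨hd, tl, hL⟩ := List.exists_cons_of_ne_nil (List.splitOnP_ne_nil (fun a => a == c) xs)
      have hL' : xs.splitOn c = hd :: tl := hL
      rw [show (x :: xs).splitOn c = (x :: hd) :: tl by
        simp only [List.splitOn, List.splitOnP_cons]
        rw [if_neg hbc, hL]
        rfl] at hl
      rcases List.mem_cons.mp hl with rfl | hl
      · intro hc
        rcases List.mem_cons.mp hc with rfl | hc
        · exact hbc (by simp)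
        · exact ih hd (by rw [hL']; exact List.mem_cons_self) hc
      · exact ih l (by rw [hL']; exact List.mem_cons_of_mem hd hl)

theorem pvSectionB_toList (fc : String) : (pvSectionB fc).toList = pvSecC fc.toList := by
  have hf' : PySem.Str.find fc "### Task Attempted" = PySem.Chars.find fc.toList pvM := rfl
  simp only [pvSectionB, pvPartition, pvSecC]
  by_cases hf : PySem.Chars.find fc.toList pvM = -1
  · rw [hf', if_pos hf, if_pos hf]
    simp
  · rw [hf', if_neg hf, if_neg hf]
    have h18 : PySem.Str.len "### Task Attempted" = 18 := by decide
    rw [h18]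
    simp only [ne_eq, String.reduceEq, not_false_eq_true, if_pos]
    have h0 : 0 ≤ PySem.Chars.find fc.toList pvM := by
      have := PySem.Chars.neg_one_le_find fc.toList pvM; omega
    have htail : (PySem.Str.slice fc (some (PySem.Chars.find fc.toList pvM + 18)) none).toList
        = fc.toList.drop (PySem.Chars.find fc.toList pvM + 18).toNat := by
      rw [PySem.Str.toList_slice, PySem.Chars.slice_eq_listSlice, PySem.List.slice_from _ (by omega)]
    have hg' : PySem.Str.find (PySem.Str.slice fc (some (PySem.Chars.find fc.toList pvM + 18)) none) "\n"
        = PySem.Chars.find (fc.toList.drop (PySem.Chars.find fc.toList pvM + 18).toNat) ['\n'] := by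
      show PySem.Chars.find (PySem.Str.slice fc (some (PySem.Chars.find fc.toList pvM + 18)) none).toList _ = _
      rw [htail]
      congr 1
    rw [hg']
    by_cases hg : PySem.Chars.find (fc.toList.drop (PySem.Chars.find fc.toList pvM + 18).toNat) ['\n'] = -1
    · rw [if_pos hg, if_pos hg]; simp
    · rw [if_neg hg, if_neg hg]
      have hg0 : 0 ≤ PySem.Chars.find (fc.toList.drop (PySem.Chars.find fc.toList pvM + 18).toNat) ['\n'] := by
        have := PySem.Chars.neg_one_le_find (fc.toList.drop (PySem.Chars.find fc.toList pvM + 18).toNat) ['\n']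
        omega
      have h1 : PySem.Str.len "\n" = 1 := by decide
      rw [h1, PySem.Str.toList_slice, PySem.Chars.slice_eq_listSlice, htail,
        PySem.List.slice_from _ (by omega)]

theorem pvCutB_toList (s : String) : (pvCutB s).toList = pvCutC s.toList := by
  have hsw : PySem.Str.startswith s "###" = PySem.Chars.startswith s.toList pvH3 := rfl
  have hf' : PySem.Str.find s "\n###" = PySem.Chars.find s.toList pvH4 := rfl
  simp only [pvCutB, pvPartition, pvCutC]
  by_cases hs : PySem.Chars.startswith s.toList pvH3 = true
  · rw [hsw, hs]; simp
  · have hsf : PySem.Chars.startswith s.toList pvH3 = false := by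
      cases hq : PySem.Chars.startswith s.toList pvH3
      · rfl
      · exact absurd hq hs
    rw [hsw, hsf]
    simp only [Bool.false_eq_true, if_false]
    by_cases hf : PySem.Chars.find s.toList pvH4 = -1
    · rw [hf', if_pos hf, if_pos hf]
    · rw [hf', if_neg hf, if_neg hf]
      have h0 : 0 ≤ PySem.Chars.find s.toList pvH4 := by
        have := PySem.Chars.neg_one_le_find s.toList pvH4; omega
      rw [PySem.Str.toList_slice, PySem.Chars.slice_eq_listSlice, PySem.List.slice_to _ (by omega)]

def pvRef (lines : List String) : List String :=
  match lines.findIdx? (fun l => PySem.Str.isIn "### Task Attempted" l) with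
  | none => []
  | some i =>
    let sls := lines.drop (i+1)
    ((sls.take ((sls.findIdx? (fun l => PySem.Str.startswith l "###")).getD sls.length)).filter
      (fun l => !(PySem.Str.strip l == ""))).map PySem.Str.strip

theorem pvSplit?_nl (s : String) :
    (PySem.Str.split? s "\n").getD [] = (s.toList.splitOn '\n').map String.ofList := by
  have h1 : PySem.Str.split? s "\n" = some ((s.toList.splitOn '\n').map String.ofList) := by
    show Option.map _ (PySem.Chars.split? s.toList "\n".toList) = _
    rw [show ("\n".toList : List Char) = ['\n'] from rfl]
    rw [show PySem.Chars.split? s.toList ['\n'] = some (PySem.Chars.splitOn s.toList ['\n']) from by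
      simp [PySem.Chars.split?]]
    rw [pvSplitOn_eq]
    rfl
  rw [h1, Option.getD_some]

theorem pvIsInM_ofList (l : List Char) :
    PySem.Str.isIn "### Task Attempted" (String.ofList l) = PySem.Chars.isIn pvM l := by
  have h : PySem.Str.isIn "### Task Attempted" (String.ofList l)
      = PySem.Chars.isIn pvM (String.ofList l).toList := rfl
  rw [h, String.toList_ofList]

theorem pvSW_ofList (l : List Char) :
    PySem.Str.startswith (String.ofList l) "###" = PySem.Chars.startswith l pvH3 := by
  have h : PySem.Str.startswith (String.ofList l) "###"
      = PySem.Chars.startswith (String.ofList l).toList pvH3 := rfl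
  rw [h, String.toList_ofList]

theorem pvCutC_nil : pvCutC ([] : List Char) = [] := by
  simp [pvCutC, show PySem.Chars.startswith [] pvH3 = false by decide,
    show PySem.Chars.find [] pvH4 = -1 by decide]

theorem pvEmptyLines :
    ((([] : List Char).splitOn '\n').map String.ofList).filter (fun l => !(PySem.Str.strip l == "")) = [] := by
  rw [show (([] : List Char).splitOn '\n') = [[]] by simp [List.splitOn, List.splitOnP_nil]]
  simp only [List.map_cons, List.map_nil, List.filter]
  decide

theorem pvRef_none (lines : List String)
    (h : lines.findIdx? (fun l => PySem.Str.isIn "### Task Attempted" l) = none) :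
    pvRef lines = [] := by
  unfold pvRef
  rw [h]

theorem pvRef_some (lines : List String) (i : Nat)
    (h : lines.findIdx? (fun l => PySem.Str.isIn "### Task Attempted" l) = some i) :
    pvRef lines =
      (((lines.drop (i+1)).take (((lines.drop (i+1)).findIdx?
          (fun l => PySem.Str.startswith l "###")).getD (lines.drop (i+1)).length)).filter
        (fun l => !(PySem.Str.strip l == ""))).map PySem.Str.strip := by
  unfold pvRef
  rw [h]

theorem pvAlt_task_lines (fc : String) :
    (((PySem.Str.split? (pvCutB (pvSectionB fc)) "\n").getD []).filter
        (fun l => !(PySem.Str.strip l == ""))).map PySem.Str.strip =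
      pvRef ((PySem.Str.split? fc "\n").getD []) := by
  have hfree := pvSplitOn_not_mem '\n' fc.toList
  have hjoin : pvJoin (fc.toList.splitOn '\n') = fc.toList := List.intercalate_splitOn fc.toList '\n'
  have hsec : (pvCutB (pvSectionB fc)).toList = pvCutC (pvSecC fc.toList) := by
    rw [pvCutB_toList, pvSectionB_toList]
  have hsecL := pvSecC_join (fc.toList.splitOn '\n') hfree
  rw [hjoin] at hsecL
  rw [pvSplit?_nl fc, pvSplit?_nl (pvCutB (pvSectionB fc)), hsec]
  have hidxM : ((fc.toList.splitOn '\n').map String.ofList).findIdx?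
        (fun l => PySem.Str.isIn "### Task Attempted" l)
      = (fc.toList.splitOn '\n').findIdx? (fun l => PySem.Chars.isIn pvM l) := by
    rw [List.findIdx?_map]
    congr 1
    funext l
    exact pvIsInM_ofList l
  cases hcase : (fc.toList.splitOn '\n').findIdx? (fun l => PySem.Chars.isIn pvM l) with
  | none =>
    rw [hcase] at hsecL
    have hsecL2 : pvSecC fc.toList = [] := by rw [hsecL]
    rw [pvRef_none _ (hidxM.trans hcase), hsecL2, pvCutC_nil, pvEmptyLines]
    simp
  | some i =>
    rw [hcase] at hsecL
    have hsecL2 : pvSecC fc.toList = pvJoin ((fc.toList.splitOn '\n').drop (i+1)) := by rw [hsecL]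
    have hfree2 : ∀ l ∈ (fc.toList.splitOn '\n').drop (i+1), '\n' ∉ l :=
      fun x hx => hfree x (List.mem_of_mem_drop hx)
    have hcut := pvCutC_join ((fc.toList.splitOn '\n').drop (i+1)) hfree2
    rw [pvRef_some _ i (hidxM.trans hcase), hsecL2, hcut]
    rw [← List.map_drop]
    set sls := (fc.toList.splitOn '\n').drop (i+1) with hsls
    rw [List.findIdx?_map]
    have hpredeq : ((fun l => PySem.Str.startswith l "###") ∘ String.ofList)
        = (fun l => PySem.Chars.startswith l pvH3) := by
      funext l
      exact pvSW_ofList l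
    rw [hpredeq, List.length_map, ← List.map_take]
    set k := (sls.findIdx? (fun l => PySem.Chars.startswith l pvH3)).getD sls.length with hk
    by_cases hxs : sls.take k = []
    · rw [hxs, pvJoin_nil, pvEmptyLines]
      simp
    · have hfree3 : ∀ l ∈ sls.take k, '\n' ∉ l := fun x hx => hfree2 x (List.mem_of_mem_take hx)
      rw [show (pvJoin (sls.take k)).splitOn '\n' = sls.take k from
        List.splitOn_intercalate (sls.take k) '\n' hfree3 hxs]

theorem pvLoopA_true_clean (lines : List String)
    (hno : ∀ l ∈ lines, PySem.Str.isIn "### Task Attempted" l = false) :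
    ∀ acc, pvLoopA lines true acc =
      acc ++ ((lines.take ((lines.findIdx? (fun l => PySem.Str.startswith l "###")).getD lines.length)).filter
        (fun l => !(PySem.Str.strip l == ""))).map PySem.Str.strip := by
  induction lines with
  | nil => intro acc; simp [pvLoopA]
  | cons l rest ih =>
    intro acc
    have hm := hno l List.mem_cons_self
    have hno2 : ∀ x ∈ rest, PySem.Str.isIn "### Task Attempted" x = false :=
      fun x hx => hno x (List.mem_cons_of_mem l hx)
    rw [pvLoopA, if_neg (by rw [hm]; exact Bool.false_ne_true), List.findIdx?_cons]
    by_cases hs : PySem.Str.startswith l "###" = true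
    · rw [if_pos (by rw [hs]; rfl)]
      simp only [hs, if_pos, Option.getD_some, List.take_zero, List.filter_nil, List.map_nil,
        List.append_nil]
    · have hsf : PySem.Str.startswith l "###" = false := by
        cases hq : PySem.Str.startswith l "###"
        · rfl
        · exact absurd hq hs
      rw [if_neg (by rw [hsf]; simp)]
      simp only [hsf, Bool.false_eq_true, if_false]
      have hkgd : ((Option.map (fun i => i + 1)
            (List.findIdx? (fun l => PySem.Str.startswith l "###") rest)).getD (l :: rest).length)
          = (List.findIdx? (fun l => PySem.Str.startswith l "###") rest).getD rest.length + 1 := by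
        cases List.findIdx? (fun l => PySem.Str.startswith l "###") rest with
        | none => simp [List.length_cons]
        | some j => simp
      rw [hkgd, List.take_succ_cons]
      by_cases hb : (PySem.Str.strip l == "") = true
      · rw [if_neg (by rw [hb]; simp)]
        rw [ih hno2 acc]
        congr 1
        rw [List.filter_cons, hb]
        simp
      · have hbf : (PySem.Str.strip l == "") = false := by
          cases hq : (PySem.Str.strip l == "")
          · rfl
          · exact absurd hq hb
        rw [if_pos (by rw [hbf]; rfl)]
        rw [ih hno2 (acc ++ [PySem.Str.strip l])]
        rw [List.filter_cons, hbf]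
        simp

theorem pvLoopA_eq_ref (lines : List String)
    (hcnt : lines.countP (fun l => PySem.Str.isIn "### Task Attempted" l) ≤ 1) :
    pvLoopA lines false [] = pvRef lines := by
  induction lines with
  | nil => simp [pvLoopA, pvRef]
  | cons l rest ih =>
    by_cases hm : PySem.Str.isIn "### Task Attempted" l = true
    · rw [pvLoopA, if_pos hm]
      have h2 : (l :: rest).countP (fun l => PySem.Str.isIn "### Task Attempted" l)
          = rest.countP (fun l => PySem.Str.isIn "### Task Attempted" l) + 1 :=
        List.countP_cons_of_pos (by simpa using hm)
      have hc1 : rest.countP (fun l => PySem.Str.isIn "### Task Attempted" l) = 0 := by omega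
      have hno : ∀ x ∈ rest, PySem.Str.isIn "### Task Attempted" x = false := by
        intro x hx
        have hq2 := List.countP_eq_zero.mp hc1 x hx
        cases hq : PySem.Str.isIn "### Task Attempted" x
        · rfl
        · exact absurd hq hq2
      rw [pvLoopA_true_clean rest hno []]
      rw [pvRef_some (l :: rest) 0 (by
        rw [List.findIdx?_cons,
          if_pos (show (fun l => PySem.Str.isIn "### Task Attempted" l) l = true from hm)])]
      simp
    · have hmf : PySem.Str.isIn "### Task Attempted" l = false := by
        cases hq : PySem.Str.isIn "### Task Attempted" l
        · rfl
        · exact absurd hq hm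
      rw [pvLoopA, if_neg (by rw [hmf]; exact Bool.false_ne_true),
        if_neg (by simp), if_neg (by simp)]
      have h2 : (l :: rest).countP (fun l => PySem.Str.isIn "### Task Attempted" l)
          = rest.countP (fun l => PySem.Str.isIn "### Task Attempted" l) :=
        List.countP_cons_of_neg (show ¬ (fun l => PySem.Str.isIn "### Task Attempted" l) l = true from by
          simp only [hmf]; exact Bool.false_ne_true)
      have hcnt2 : rest.countP (fun l => PySem.Str.isIn "### Task Attempted" l) ≤ 1 := by omega
      rw [ih hcnt2]
      cases hidx : List.findIdx? (fun l => PySem.Str.isIn "### Task Attempted" l) rest with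
      | none =>
        rw [pvRef_none rest hidx, pvRef_none (l :: rest) (by
          rw [List.findIdx?_cons,
            if_neg (show ¬ (fun l => PySem.Str.isIn "### Task Attempted" l) l = true from by
              simp only [hmf]; exact Bool.false_ne_true), hidx]
          rfl)]
      | some j =>
        rw [pvRef_some rest j hidx, pvRef_some (l :: rest) (j+1) (by
          rw [List.findIdx?_cons,
            if_neg (show ¬ (fun l => PySem.Str.isIn "### Task Attempted" l) l = true from by
              simp only [hmf]; exact Bool.false_ne_true), hidx]
          rfl)]
        simp

-- ===== VERDICT (by name: the statement is the Claim_ definition above) =====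
theorem extract_summary_for_issue_spec : Claim_equal_extract_summary_for_issue := by
  intro fc _ hpre
  unfold Pre_extract_summary_for_issue at hpre
  have hA := pvLoopA_eq_ref ((PySem.Str.split? fc "\n").getD []) hpre
  have hB := pvAlt_task_lines fc
  simp only [Spec_extract_summary_for_issue, extract_summary_for_issue, extract_summary_for_issue_alt]
  rw [hA, hB]
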